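-- pv_equiv track=rewrite | github.com/mbaljko/vault-grading-pipeline | 01_units/pipelines/pl1C_rubric_devt/python/generate-scoring-stats-for-manifest.py | build_changed_score_history_rows
-- ===== SOURCE A (Python) =====
-- def summarize_score_value(evidence_status: str) -> str:
-- 	normalized = evidence_status.strip().lower()
-- 	if normalized == "present":
-- 		return "P"
-- 	if normalized == "not_present":
-- 		return "N"
-- 	return evidence_status.strip()
--
-- def build_changed_score_history_rows(
-- 	changed_diff_rows: list[list[str]],
-- 	iteration_history_labels: list[str],
-- 	historical_rows_by_iteration: dict[str, dict[str, list[dict[str, str]]]],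
-- ) -> list[list[str]]:
-- 	indexes_by_iteration: dict[str, dict[str, dict[tuple[str, str], dict[str, str]]]] = {}
-- 	for iteration_label in iteration_history_labels:
-- 		component_indexes: dict[str, dict[tuple[str, str], dict[str, str]]] = {}
-- 		for component_id, rows in historical_rows_by_iteration.get(iteration_label, {}).items():
-- 			component_indexes[component_id] = {
-- 				(
-- 					(row.get("indicator_id") or "").strip(),
-- 					(row.get("submission_id") or "").strip(),
-- 				): row
-- 				for row in rows
-- 				if (row.get("indicator_id") or "").strip() and (row.get("submission_id") or "").strip()
-- 			}
-- 		indexes_by_iteration[iteration_label] = component_indexes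
--
-- 	history_rows: list[list[str]] = []
-- 	for changed_row in changed_diff_rows:
-- 		component_id, indicator_id, submission_id = changed_row[:3]
-- 		row_values = [component_id, indicator_id, submission_id]
-- 		for iteration_label in iteration_history_labels:
-- 			row = indexes_by_iteration.get(iteration_label, {}).get(component_id, {}).get((indicator_id, submission_id))
-- 			row_values.append(summarize_score_value(row.get("evidence_status") or "") if row is not None else "")
-- 		history_rows.append(row_values)
-- 	return history_rows
-- ===== SOURCE B (Python) =====
-- def summarize_score_value(evidence_status: str) -> str:
-- 	normalized = evidence_status.strip().lower()
-- 	if normalized == "present":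
-- 		return "P"
-- 	if normalized == "not_present":
-- 		return "N"
-- 	return evidence_status.strip()
--
-- def build_changed_score_history_rows(
-- 	changed_diff_rows,
-- 	iteration_history_labels,
-- 	historical_rows_by_iteration,
-- ):
-- 	history_rows = []
-- 	for changed_row in changed_diff_rows:
-- 		component_id, indicator_id, submission_id = changed_row[:3]
-- 		row_values = [component_id, indicator_id, submission_id]
-- 		for iteration_label in iteration_history_labels:
-- 			rows = historical_rows_by_iteration.get(iteration_label, {}).get(component_id, [])
-- 			cell = ""
-- 			for row in reversed(rows):
-- 				ind = (row.get("indicator_id") or "").strip()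
-- 				sub = (row.get("submission_id") or "").strip()
-- 				if ind and sub and ind == indicator_id and sub == submission_id:
-- 					cell = summarize_score_value(row.get("evidence_status") or "")
-- 					break
-- 			row_values.append(cell)
-- 		history_rows.append(row_values)
-- 	return history_rows
-- ===== Notes on version B (the rewrite author's own statement) =====
-- stated objective: simpler
-- what changed: Drops the two-level precomputed index dictionaries entirely: for each changed row B directly scans the historical rows of that component in reverse and takes the first (i.e. Python's last-wins) row whose stripped non-empty indicator/submission ids equal the changed row's raw ids.
import Mathlib
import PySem

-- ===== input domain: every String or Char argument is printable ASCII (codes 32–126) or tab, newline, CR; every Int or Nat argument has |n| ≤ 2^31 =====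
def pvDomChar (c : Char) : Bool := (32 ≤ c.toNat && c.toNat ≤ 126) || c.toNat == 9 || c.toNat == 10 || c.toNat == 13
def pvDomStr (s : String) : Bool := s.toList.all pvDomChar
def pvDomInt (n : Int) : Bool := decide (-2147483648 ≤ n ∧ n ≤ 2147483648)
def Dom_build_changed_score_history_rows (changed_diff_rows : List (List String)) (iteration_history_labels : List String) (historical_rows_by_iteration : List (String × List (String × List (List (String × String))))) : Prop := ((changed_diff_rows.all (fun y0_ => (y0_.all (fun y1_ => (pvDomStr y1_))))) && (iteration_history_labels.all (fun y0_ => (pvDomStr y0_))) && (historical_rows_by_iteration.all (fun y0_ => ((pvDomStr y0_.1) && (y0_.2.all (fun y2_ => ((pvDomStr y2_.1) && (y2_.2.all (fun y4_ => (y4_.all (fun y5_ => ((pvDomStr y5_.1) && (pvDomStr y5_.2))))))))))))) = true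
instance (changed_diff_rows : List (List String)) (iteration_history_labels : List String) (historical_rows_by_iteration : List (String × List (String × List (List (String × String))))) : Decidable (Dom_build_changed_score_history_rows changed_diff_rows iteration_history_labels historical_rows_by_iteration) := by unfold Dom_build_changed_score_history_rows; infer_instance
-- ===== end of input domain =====

-- B replaces A's precomputed two-level index dictionaries by a direct reverse scan of the
-- component's historical rows for each changed row (simpler; not claimed faster).

-- shared module helpers (both Pythons use summarize_score_value; pvRGet is `row.get(k) or ""`)
def pvSummarize (evidence_status : String) : String :=
  let normalized := PySem.Str.lower (PySem.Str.strip evidence_status)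
  if normalized = "present" then "P"
  else if normalized = "not_present" then "N"
  else PySem.Str.strip evidence_status

def pvRGet (row : List (String × String)) (k : String) : String :=
  (PySem.Dict.mk row).getD k ""

def pvCond (row : List (String × String)) : Bool :=
  (PySem.Str.strip (pvRGet row "indicator_id") != "") &&
  (PySem.Str.strip (pvRGet row "submission_id") != "")

def pvKey (row : List (String × String)) : String × String :=
  (PySem.Str.strip (pvRGet row "indicator_id"), PySem.Str.strip (pvRGet row "submission_id"))

-- `component_id, indicator_id, submission_id = changed_row[:3]` (none = Python ValueError)
def pvUnpack3 (xs : List String) : Option (String × String × String) :=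
  match PySem.List.slice xs (some 0) (some 3) with
  | [a, b, c] => some (a, b, c)
  | _ => none

-- ===== PORT A =====
-- the dict comprehension over one component's rows
def pvMkIdx (rows : List (List (String × String))) : PySem.Dict (String × String) (List (String × String)) :=
  rows.foldl (fun d row => if pvCond row then d.insert (pvKey row) row else d) PySem.Dict.empty

-- component_indexes for one iteration label
def pvCompIdx (historical_rows_by_iteration : List (String × List (String × List (List (String × String))))) (lab : String) : PySem.Dict String (PySem.Dict (String × String) (List (String × String))) :=
  ((PySem.Dict.mk historical_rows_by_iteration).getD lab []).foldl
    (fun d p => d.insert p.1 (pvMkIdx p.2)) PySem.Dict.empty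

def build_changed_score_history_rows (changed_diff_rows : List (List String)) (iteration_history_labels : List String) (historical_rows_by_iteration : List (String × List (String × List (List (String × String))))) : List (List String) :=
  let indexes_by_iteration :=
    iteration_history_labels.foldl
      (fun d lab => d.insert lab (pvCompIdx historical_rows_by_iteration lab)) PySem.Dict.empty
  changed_diff_rows.foldl (fun history_rows changed_row =>
    -- Python raises ValueError when changed_row has < 3 cells; excluded by Pre_
    (pvUnpack3 changed_row).elim history_rows (fun cis =>
      let component_id := cis.1
      let indicator_id := cis.2.1
      let submission_id := cis.2.2
      let row_values := iteration_history_labels.foldl (fun rv lab =>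
        let cell :=
          (((indexes_by_iteration.getD lab PySem.Dict.empty).getD component_id PySem.Dict.empty).get? (indicator_id, submission_id)).elim
            "" (fun row => pvSummarize (pvRGet row "evidence_status"))
        rv ++ [cell]) [component_id, indicator_id, submission_id]
      history_rows ++ [row_values])) []

-- ===== PORT B =====
def build_changed_score_history_rows_alt (changed_diff_rows : List (List String)) (iteration_history_labels : List String) (historical_rows_by_iteration : List (String × List (String × List (List (String × String))))) : List (List String) :=
  changed_diff_rows.foldl (fun history_rows changed_row =>
    -- Python raises ValueError when changed_row has < 3 cells; excluded by Pre_
    (pvUnpack3 changed_row).elim history_rows (fun cis =>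
      let component_id := cis.1
      let indicator_id := cis.2.1
      let submission_id := cis.2.2
      let row_values := iteration_history_labels.foldl (fun rv lab =>
        let rows := (PySem.Dict.mk ((PySem.Dict.mk historical_rows_by_iteration).getD lab [])).getD component_id []
        -- `for row in reversed(rows): … break` = first match of the reversed list
        let cell :=
          (rows.reverse.find? (fun row => pvCond row && (pvKey row == (indicator_id, submission_id)))).elim
            "" (fun row => pvSummarize (pvRGet row "evidence_status"))
        rv ++ [cell]) [component_id, indicator_id, submission_id]
      history_rows ++ [row_values])) []

-- ===== PRECONDITION & SPEC =====
-- Pre_ requires each changed row to have ≥ 3 cells (A's tuple unpacking raises ValueError otherwise)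
-- and excludes duplicate component ids inside one iteration's association list — such lists cannot
-- arise from a Python dict, and there A's rebuilt index is last-wins while B's direct get is first-match.
def Pre_build_changed_score_history_rows (changed_diff_rows : List (List String)) (iteration_history_labels : List String) (historical_rows_by_iteration : List (String × List (String × List (List (String × String))))) : Prop :=
  (∀ row ∈ changed_diff_rows, 3 ≤ row.length) ∧
  (∀ p ∈ historical_rows_by_iteration, (p.2.map Prod.fst).Nodup)
instance (changed_diff_rows : List (List String)) (iteration_history_labels : List String) (historical_rows_by_iteration : List (String × List (String × List (List (String × String))))) : Decidable (Pre_build_changed_score_history_rows changed_diff_rows iteration_history_labels historical_rows_by_iteration) := by unfold Pre_build_changed_score_history_rows; infer_instance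

def pvWitness_build_changed_score_history_rows : List (List String) × List String × (List (String × List (String × List (List (String × String))))) :=
  ([["c", "i", "s"]], ["it1"],
   [("it1", [("c", [[("indicator_id", "i"), ("submission_id", "s"), ("evidence_status", "present")]])])])

def Spec_build_changed_score_history_rows (changed_diff_rows : List (List String)) (iteration_history_labels : List String) (historical_rows_by_iteration : List (String × List (String × List (List (String × String))))) (out : List (List String)) : Prop := out = build_changed_score_history_rows_alt changed_diff_rows iteration_history_labels historical_rows_by_iteration
instance (changed_diff_rows : List (List String)) (iteration_history_labels : List String) (historical_rows_by_iteration : List (String × List (String × List (List (String × String))))) (out : List (List String)) : Decidable (Spec_build_changed_score_history_rows changed_diff_rows iteration_history_labels historical_rows_by_iteration out) := by unfold Spec_build_changed_score_history_rows; infer_instance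

-- ===== CLAIM (what is proved, stated in full; the proofs are below) =====
def Claim_equal_build_changed_score_history_rows : Prop := ∀ (changed_diff_rows : List (List String)) (iteration_history_labels : List String) (historical_rows_by_iteration : List (String × List (String × List (List (String × String))))), Dom_build_changed_score_history_rows changed_diff_rows iteration_history_labels historical_rows_by_iteration → Pre_build_changed_score_history_rows changed_diff_rows iteration_history_labels historical_rows_by_iteration → Spec_build_changed_score_history_rows changed_diff_rows iteration_history_labels historical_rows_by_iteration (build_changed_score_history_rows changed_diff_rows iteration_history_labels historical_rows_by_iteration)

-- ===== LEMMAS AND PROOFS =====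

-- A's dict comprehension (last key wins) looked up at k = first match of a reverse scan
theorem pvMkIdx_get? (rows : List (List (String × String))) (k : String × String)
    (d0 : PySem.Dict (String × String) (List (String × String))) :
    (rows.foldl (fun d row => if pvCond row then d.insert (pvKey row) row else d) d0).get? k
      = (rows.reverse.find? (fun row => pvCond row && (pvKey row == k))).orElse (fun _ => d0.get? k) := by
  induction rows generalizing d0 with
  | nil => simp [Option.orElse]
  | cons a t ih =>
    simp only [List.foldl_cons, List.reverse_cons, List.find?_append]
    rw [ih]
    cases h : t.reverse.find? (fun row => pvCond row && (pvKey row == k)) with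
    | some r => simp [Option.orElse]
    | none =>
      simp only [Option.orElse]
      by_cases hc : pvCond a
      · by_cases hk : pvKey a = k
        · subst hk
          simp [hc, PySem.Dict.get?_insert_self]
        · simp [hc, hk, PySem.Dict.get?_insert_of_ne _ _ (Ne.symm hk)]
      · simp [hc]

-- a fold inserting (p.1, g p.2) over an assoc list with Nodup keys, looked up
theorem pvFoldInsert_get? {ν : Type} (assoc : List (String × List (List (String × String))))
    (g : List (List (String × String)) → ν) (c : String) (d0 : PySem.Dict String ν)
    (hnd : (assoc.map Prod.fst).Nodup) :
    (assoc.foldl (fun d p => d.insert p.1 (g p.2)) d0).get? c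
      = match (PySem.Dict.mk assoc).get? c with
        | some rows => some (g rows)
        | none => d0.get? c := by
  induction assoc generalizing d0 with
  | nil => rfl
  | cons a t ih =>
    obtain ⟨k, v⟩ := a
    simp only [List.map_cons, List.nodup_cons] at hnd
    simp only [List.foldl_cons]
    rw [ih _ hnd.2, PySem.Dict.get?_mk_cons]
    by_cases he : k = c
    · subst he
      have hnone : (PySem.Dict.mk t).get? k = none := by
        rw [PySem.Dict.get?_eq_none_iff_not_mem_keys]
        simpa [PySem.Dict.keys] using hnd.1
      simp [hnone, PySem.Dict.get?_insert_self]
    · simp only [show (k == c) = false from by simp [he]]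
      cases h : (PySem.Dict.mk t).get? c with
      | some r => simp
      | none => simp [PySem.Dict.get?_insert_of_ne _ _ (fun hh => he hh.symm)]

-- inserting F l for every l in a list: lookup of a member yields F of it (duplicates harmless)
theorem pvFoldInsertFun_get? {ν : Type} (labels : List String) (F : String → ν)
    (lab : String) (d0 : PySem.Dict String ν) :
    (labels.foldl (fun d l => d.insert l (F l)) d0).get? lab
      = if lab ∈ labels then some (F lab) else d0.get? lab := by
  induction labels generalizing d0 with
  | nil => simp
  | cons a t ih =>
    simp only [List.foldl_cons]
    rw [ih]
    by_cases h : lab ∈ t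
    · simp [h]
    · by_cases he : lab = a
      · subst he
        simp [h, PySem.Dict.get?_insert_self]
      · simp [h, he, PySem.Dict.get?_insert_of_ne _ _ he]

theorem pvCell_eq (hist : List (String × List (String × List (List (String × String)))))
    (labels : List String) (lab : String) (c i s : String)
    (hnd : ∀ p ∈ hist, (p.2.map Prod.fst).Nodup) (hmem : lab ∈ labels) :
    ((((labels.foldl (fun d l => d.insert l (pvCompIdx hist l)) PySem.Dict.empty).getD lab PySem.Dict.empty).getD c PySem.Dict.empty).get? (i, s)).elim
        "" (fun row => pvSummarize (pvRGet row "evidence_status"))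
    = (((PySem.Dict.mk ((PySem.Dict.mk hist).getD lab [])).getD c []).reverse.find? (fun row => pvCond row && (pvKey row == (i, s)))).elim
        "" (fun row => pvSummarize (pvRGet row "evidence_status")) := by
  have hnd' : ((((PySem.Dict.mk hist).getD lab []) : List (String × List (List (String × String)))).map Prod.fst).Nodup := by
    cases h : (PySem.Dict.mk hist).get? lab with
    | some v =>
      rw [PySem.Dict.getD_of_get?_eq_some _ _ h]
      exact hnd (lab, v) (PySem.Dict.mem_items_of_get?_eq_some _ h)
    | none => rw [PySem.Dict.getD_of_get?_eq_none _ _ h]; simp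
  have hA : (labels.foldl (fun d l => d.insert l (pvCompIdx hist l)) PySem.Dict.empty).getD lab PySem.Dict.empty = pvCompIdx hist lab := by
    rw [PySem.Dict.getD_eq_get?_getD, pvFoldInsertFun_get?]
    simp [hmem]
  have hB : (pvCompIdx hist lab).getD c PySem.Dict.empty
      = match (PySem.Dict.mk ((PySem.Dict.mk hist).getD lab [])).get? c with
        | some rows => pvMkIdx rows
        | none => PySem.Dict.empty := by
    rw [PySem.Dict.getD_eq_get?_getD, pvCompIdx, pvFoldInsert_get? _ _ _ _ hnd']
    cases h : (PySem.Dict.mk ((PySem.Dict.mk hist).getD lab [])).get? c <;>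
      simp [PySem.Dict.get?_empty]
  rw [hA, hB]
  cases h : (PySem.Dict.mk ((PySem.Dict.mk hist).getD lab [])).get? c with
  | some rows =>
    simp only []
    rw [pvMkIdx, pvMkIdx_get?, PySem.Dict.getD_of_get?_eq_some _ _ h]
    cases hf : rows.reverse.find? (fun row => pvCond row && (pvKey row == (i, s))) <;>
      simp [Option.orElse]
  | none =>
    simp only []
    rw [PySem.Dict.getD_of_get?_eq_none _ _ h]
    simp [PySem.Dict.get?_empty]

-- ===== VERDICT (by name: the statement is the Claim_ definition above) =====
theorem build_changed_score_history_rows_spec : Claim_equal_build_changed_score_history_rows := by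
  intro cdr labels hist _hdom hpre
  unfold Spec_build_changed_score_history_rows
  unfold build_changed_score_history_rows build_changed_score_history_rows_alt
  apply PySem.List.foldl_congr_mem'
  intro row hrow acc
  cases hu : pvUnpack3 row with
  | none => rfl
  | some cis =>
    simp only [Option.elim]
    refine congrArg (fun z => acc ++ [z]) ?_
    apply PySem.List.foldl_congr_mem'
    intro lab hlab rv
    refine congrArg (fun z => rv ++ [z]) ?_
    exact pvCell_eq hist labels lab cis.1 cis.2.1 cis.2.2 hpre.2 hlab
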